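-- pv_equiv track=rewrite | github.com/al3xx4nax/Urban_University | homework33.py | all_variants
-- ===== SOURCE A (Python) =====
-- import itertools
--
-- def all_variants(my_str):
--     temp_list = []
--     for lst_1 in range(1, len(my_str) + 1):
--         temp_list.append(list(itertools.combinations(my_str, lst_1)))
--     for lst_2 in temp_list:
--         for lst_3 in lst_2:
--             if ''.join(lst_3) != 'ac':
--                 yield ''.join(lst_3)
-- ===== SOURCE B (Python) =====
-- def all_variants(my_str):
--     # Build the full powerset of subsequences once (index-lexicographic order),
--     # then emit by increasing length; replaces the per-length itertools.combinations calls.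
--     subs = ['']
--     for ch in reversed(my_str):
--         subs = [ch + t for t in subs] + subs
--     for r in range(1, len(my_str) + 1):
--         for s in subs:
--             if len(s) == r and s != 'ac':
--                 yield s
-- ===== Notes on version B (the rewrite author's own statement) =====
-- stated objective: alternative
-- what changed: B builds the full powerset of subsequences once with a single fold over the reversed string and then scans it by length for each r, instead of calling itertools.combinations separately for each length and buffering the per-length lists.
import Mathlib
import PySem

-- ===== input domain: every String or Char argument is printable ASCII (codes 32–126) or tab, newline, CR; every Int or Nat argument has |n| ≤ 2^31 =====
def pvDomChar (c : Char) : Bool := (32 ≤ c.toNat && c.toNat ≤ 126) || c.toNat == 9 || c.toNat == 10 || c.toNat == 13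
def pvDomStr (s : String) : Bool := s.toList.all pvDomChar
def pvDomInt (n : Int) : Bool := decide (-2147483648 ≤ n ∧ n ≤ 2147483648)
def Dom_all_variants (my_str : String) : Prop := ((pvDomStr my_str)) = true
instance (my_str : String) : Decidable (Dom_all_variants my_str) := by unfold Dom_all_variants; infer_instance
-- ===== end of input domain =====

-- B replaces the per-length itertools.combinations calls by ONE powerset fold plus a
-- per-length scan (alternative decomposition, same order and same asymptotic cost).

-- ===== PORT A =====
-- exact port of itertools.combinations over the string's characters:
-- tuples of r distinct positions in increasing index order, emitted lexicographically.
def pyCombinations : List Char → Nat → List (List Char)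
  | _, 0 => [[]]
  | [], _ + 1 => []
  | c :: rest, r + 1 =>
      (pyCombinations rest r).map (fun t => c :: t) ++ pyCombinations rest (r + 1)

def all_variants (my_str : String) : List String :=
  let cs := my_str.toList
  -- temp_list = []; for lst_1 in range(1, len(my_str)+1): temp_list.append(list(combinations(my_str, lst_1)))
  let temp_list := (PySem.List.pyRange 1 ((cs.length : Int) + 1) 1).foldl
      (fun tl r => tl ++ [pyCombinations cs r.toNat]) []
  -- for lst_2 in temp_list: for lst_3 in lst_2: if ''.join(lst_3) != 'ac': yield ''.join(lst_3)
  temp_list.foldl (fun acc lst2 =>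
    lst2.foldl (fun acc2 lst3 =>
      if String.mk lst3 ≠ "ac" then acc2 ++ [String.mk lst3] else acc2) acc) []

-- ===== PORT B =====
def all_variants_alt (my_str : String) : List String :=
  -- subs = ['']; for ch in reversed(my_str): subs = [ch + t for t in subs] + subs
  -- (Python strings built by concatenation are carried as List Char; ch + t is ch :: t)
  let subs := my_str.toList.reverse.foldl
      (fun subs ch => subs.map (fun t => ch :: t) ++ subs) ([[]] : List (List Char))
  -- for r in range(1, len(my_str)+1): for s in subs: if len(s) == r and s != 'ac': yield s
  (PySem.List.pyRange 1 ((my_str.toList.length : Int) + 1) 1).foldl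
    (fun acc r => subs.foldl (fun acc2 s =>
        if (s.length : Int) = r ∧ String.mk s ≠ "ac" then acc2 ++ [String.mk s] else acc2) acc) []

-- ===== PRECONDITION & SPEC =====
def Spec_all_variants (my_str : String) (out : List String) : Prop := out = all_variants_alt my_str
instance (my_str : String) (out : List String) : Decidable (Spec_all_variants my_str out) := by unfold Spec_all_variants; infer_instance

-- ===== CLAIM (what is proved, stated in full; the proofs are below) =====
def Claim_equal_all_variants : Prop := ∀ (my_str : String), Dom_all_variants my_str → Spec_all_variants my_str (all_variants my_str)

-- ===== LEMMAS AND PROOFS =====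

-- recursive characterisation of B's powerset fold
def pvPow : List Char → List (List Char)
  | [] => [[]]
  | c :: rest => (pvPow rest).map (fun t => c :: t) ++ pvPow rest

theorem pvPow_eq_foldl (cs : List Char) :
    cs.reverse.foldl (fun subs ch => subs.map (fun t => ch :: t) ++ subs) ([[]] : List (List Char))
      = pvPow cs := by
  induction cs with
  | nil => rfl
  | cons c rest ih =>
      simp [List.reverse_cons, List.foldl_append, ih, pvPow]

-- combinations of length r = the powerset filtered to length r (order preserved)
theorem pyCombinations_eq_filter (cs : List Char) (r : Nat) :
    pyCombinations cs r = (pvPow cs).filter (fun t => t.length = r) := by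
  induction cs generalizing r with
  | nil =>
      cases r with
      | zero => rfl
      | succ r => simp [pyCombinations, pvPow]
  | cons c rest ih =>
      cases r with
      | zero =>
          have e : pyCombinations rest 0 = [[]] := by cases rest <;> rfl
          have h0 : (pvPow rest).filter (fun t => decide (t = [])) = [[]] := by
            have h := (ih 0).symm
            rw [e] at h
            simpa using h
          simp [pyCombinations, pvPow, List.filter_append, List.filter_map,
                Function.comp_def, h0]
      | succ r =>
          simp only [pyCombinations, pvPow, List.filter_append, List.filter_map, ih]
          congr 2
          apply List.filter_congr
          intro t _
          simp

theorem all_variants_eq (my_str : String) :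
    all_variants my_str = all_variants_alt my_str := by
  unfold all_variants all_variants_alt
  rw [pvPow_eq_foldl]
  simp only [PySem.List.foldl_append_singleton_eq_map, PySem.List.foldl_append_ite,
    PySem.List.foldl_append_eq_flatMap, List.nil_append, List.flatMap_map]
  rw [List.flatMap_def, List.flatMap_def]
  apply congrArg
  apply List.map_congr_left
  intro r hr
  rw [PySem.List.mem_pyRange_one] at hr
  rw [pyCombinations_eq_filter, List.filter_filter]
  apply congrArg
  apply List.filter_congr
  intro t _
  have hlen : (t.length = r.toNat) ↔ ((t.length : Int) = r) := by omega
  simp [hlen, Bool.and_comm]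

-- ===== VERDICT (by name: the statement is the Claim_ definition above) =====
theorem all_variants_spec : Claim_equal_all_variants := by
  intro my_str _
  exact all_variants_eq my_str
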